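-- pv_equiv track=rewrite | github.com/zhangxin1995/MTD | code/module/eval_metrics.py | path_is_matched
-- ===== SOURCE A (Python) =====
-- def path_is_matched(a,b):
--     a=[int(k) for k in a]
--     b=[int(k) for k in b]
--     if len(a)!=len(b):
--         return False
--     inds=set(a)&set(b)
--     if len(inds)==len(a):
--         return True
-- ===== SOURCE B (Python) =====
-- def path_is_matched(a, b):
--     a = [int(k) for k in a]
--     b = [int(k) for k in b]
--     if len(a) != len(b):
--         return False
--     sa = sorted(a)
--     sb = sorted(b)
--     if sa == sb and all(x < y for x, y in zip(sa, sa[1:])):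
--         return True
-- ===== Notes on version B (the rewrite author's own statement) =====
-- stated objective: alternative
-- what changed: Replaced the set-intersection cardinality test with a sort-and-compare strategy: the match holds iff sorted(a) == sorted(b) and sorted(a) has no adjacent duplicates.
import Mathlib
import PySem

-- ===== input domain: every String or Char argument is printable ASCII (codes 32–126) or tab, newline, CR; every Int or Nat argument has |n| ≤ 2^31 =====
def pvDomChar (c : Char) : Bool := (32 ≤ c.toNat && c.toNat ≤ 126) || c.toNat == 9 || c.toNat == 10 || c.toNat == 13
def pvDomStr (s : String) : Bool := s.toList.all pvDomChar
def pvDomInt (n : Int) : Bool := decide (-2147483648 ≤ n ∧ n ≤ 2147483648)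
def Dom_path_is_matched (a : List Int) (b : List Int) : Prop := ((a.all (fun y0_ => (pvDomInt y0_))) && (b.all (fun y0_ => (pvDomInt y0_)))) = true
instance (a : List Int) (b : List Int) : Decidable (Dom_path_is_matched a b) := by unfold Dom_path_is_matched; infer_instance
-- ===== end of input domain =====

-- B replaces A's set-intersection cardinality test with sort-and-compare (sorted lists equal
-- and no adjacent duplicates); same return value everywhere, similar cost (alternative).


-- ===== PORT A =====
-- int(k) on an int is the identity, so the two comprehensions are identities here.
def path_is_matched (a : List Int) (b : List Int) : Option Bool :=
  if a.length ≠ b.length then some false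
  else
    let inds := PySem.Set.inter (PySem.Set.ofList a) (PySem.Set.ofList b)
    if PySem.Set.len inds = a.length then some true else none

-- ===== PORT B =====
-- sa[1:] is ported as sa.drop 1 (Python's xs[1:] on any list).
def path_is_matched_alt (a : List Int) (b : List Int) : Option Bool :=
  if a.length ≠ b.length then some false
  else
    let sa := PySem.List.sorted a (fun x => x) false
    let sb := PySem.List.sorted b (fun x => x) false
    if sa = sb ∧ (sa.zip (sa.drop 1)).all (fun p => decide (p.1 < p.2)) then some true
    else none

-- ===== PRECONDITION & SPEC =====
def Spec_path_is_matched (a : List Int) (b : List Int) (out : Option Bool) : Prop := out = path_is_matched_alt a b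
instance (a : List Int) (b : List Int) (out : Option Bool) : Decidable (Spec_path_is_matched a b out) := by unfold Spec_path_is_matched; infer_instance

-- ===== CLAIM (what is proved, stated in full; the proofs are below) =====
def Claim_equal_path_is_matched : Prop := ∀ (a : List Int) (b : List Int), Dom_path_is_matched a b → Spec_path_is_matched a b (path_is_matched a b)

-- ===== LEMMAS AND PROOFS =====

-- adjacent all-< over zip with the tail is Chain' (· < ·)
lemma adjAll_iff : ∀ (l : List Int),
    ((l.zip (l.drop 1)).all (fun p => decide (p.1 < p.2)) = true) ↔ l.IsChain (· < ·)
  | [] => by simp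
  | [x] => by simp
  | x :: y :: ys => by
    rw [List.isChain_cons_cons, ← adjAll_iff (y :: ys)]
    simp [List.zip]

-- the key equivalence, for lists of equal length
lemma key_iff (a b : List Int) (hlen : a.length = b.length) :
    (PySem.Set.inter (PySem.Set.ofList a) (PySem.Set.ofList b)).length = a.length ↔
      (PySem.List.sorted a (fun x => x) false = PySem.List.sorted b (fun x => x) false ∧
       (PySem.List.sorted a (fun x => x) false).Pairwise (· < ·)) := by
  set I := PySem.Set.inter (PySem.Set.ofList a) (PySem.Set.ofList b) with hI
  have hInd : I.Nodup := PySem.Set.nodup_inter _ _ (PySem.Set.nodup_ofList a)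
  have hImem : ∀ x, x ∈ I ↔ x ∈ a ∧ x ∈ b := by
    intro x; simp [hI, PySem.Set.mem_inter, PySem.Set.mem_ofList]
  constructor
  · intro hC
    have hsub : I ⊆ a := fun x hx => ((hImem x).1 hx).1
    have hperm : I.Perm a := (hInd.subperm hsub).perm_of_length_le (le_of_eq hC.symm)
    have hnda : a.Nodup := hperm.nodup_iff.mp hInd
    have hab : a ⊆ b := fun x hx => ((hImem x).1 (hperm.mem_iff.mpr hx)).2
    have hpab : a.Perm b := (hnda.subperm hab).perm_of_length_le (le_of_eq hlen.symm)
    refine ⟨(PySem.List.sorted_id_eq_sorted_id_iff_perm a b).mpr hpab, ?_⟩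
    have hsp : (PySem.List.sorted a (fun x => x) false).Perm a := PySem.List.sorted_perm a _ false
    have hnds : (PySem.List.sorted a (fun x => x) false).Nodup := hsp.nodup_iff.mpr hnda
    have hple : (PySem.List.sorted a (fun x => x) false).Pairwise (· ≤ ·) :=
      PySem.List.sorted_pairwise a (fun x => x)
    exact (hple.and hnds).imp (fun h => lt_of_le_of_ne h.1 h.2)
  · rintro ⟨hs, hplt⟩
    have hpab : a.Perm b := (PySem.List.sorted_id_eq_sorted_id_iff_perm a b).mp hs
    have hsp : (PySem.List.sorted a (fun x => x) false).Perm a := PySem.List.sorted_perm a _ false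
    have hnda : a.Nodup := hsp.nodup_iff.mp (hplt.imp (fun h => ne_of_lt h))
    have : I.Perm a := (List.perm_ext_iff_of_nodup hInd hnda).mpr (fun x => by
      rw [hImem x]
      exact ⟨fun h => h.1, fun h => ⟨h, hpab.mem_iff.mp h⟩⟩)
    exact this.length_eq

-- ===== VERDICT (by name: the statement is the Claim_ definition above) =====
theorem path_is_matched_spec : Claim_equal_path_is_matched := by
  intro a b _
  unfold Spec_path_is_matched path_is_matched path_is_matched_alt
  by_cases hlen : a.length = b.length
  · simp only [hlen, ne_eq, not_true_eq_false, if_false]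
    refine if_congr ?_ rfl rfl
    rw [PySem.Set.len, Int.natCast_inj, ← hlen, key_iff a b hlen, adjAll_iff, List.isChain_iff_pairwise]
  · simp [hlen]
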